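-- pv_equiv track=rewrite | github.com/magicianmakar/django-project | suredone_core/utils.py | format_image_urls_as_sd_media
-- ===== SOURCE A (Python) =====
-- def format_image_urls_as_sd_media(image_urls: list):
--     current_img_indx = 1
--     media_data = {'mediax': ''}
--
--     # Map each image element to a corresponding "media" field
--     for image in image_urls:
--         # CASE 1: First 10 images urls are mapped to fields "mediai" where i is the index from 1 to 10
--         if current_img_indx <= 10:
--             media_data[f'media{current_img_indx}'] = image
--
--         # CASE 2: All remaining image urls get mapped to mediax delimited by *
--         else:
--             media_data['mediax'] += f'{image}*'
--         current_img_indx += 1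
--
--     # Remove the trailing delimiting "*" symbol if there the mediax field is defined
--     if current_img_indx > 10 and len(media_data.get('mediax', [])) > 0:
--         media_data['mediax'] = media_data['mediax'][:-1]
--     return media_data
-- ===== SOURCE B (Python) =====
-- def format_image_urls_as_sd_media(image_urls: list):
--     # First 10 urls become media1..media10; the rest are joined with '*' into mediax.
--     media_data = {'mediax': '*'.join(str(u) for u in image_urls[10:])}
--     media_data.update({f'media{i + 1}': u for i, u in enumerate(image_urls[:10])})
--     return media_data
-- ===== Notes on version B (the rewrite author's own statement) =====
-- stated objective: simpler
-- what changed: Replaces the running index counter, the per-element if/else branch and the trailing-'*' cleanup with two slices: a dict comprehension over the first 10 urls and a single '*'.join over the tail; the join also avoids A's quadratic repeated string concatenation on the tail.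
import Mathlib
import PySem

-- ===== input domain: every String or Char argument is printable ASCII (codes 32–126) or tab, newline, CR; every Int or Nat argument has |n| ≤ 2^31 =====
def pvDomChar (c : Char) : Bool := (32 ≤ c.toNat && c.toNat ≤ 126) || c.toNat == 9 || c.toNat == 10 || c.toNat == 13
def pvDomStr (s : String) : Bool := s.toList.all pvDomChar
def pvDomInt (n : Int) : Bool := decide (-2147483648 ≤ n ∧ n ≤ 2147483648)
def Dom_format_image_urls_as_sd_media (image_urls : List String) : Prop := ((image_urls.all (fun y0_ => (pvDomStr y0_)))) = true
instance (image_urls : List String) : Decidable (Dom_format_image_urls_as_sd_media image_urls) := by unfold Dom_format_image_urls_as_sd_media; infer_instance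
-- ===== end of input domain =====

-- B replaces the running index counter, the per-element if/else and the trailing-'*' cleanup
-- with two slices: a dict comprehension over the first 10 urls and one '*'.join over the tail (objective: simpler).


-- ===== PORT A =====
-- the for-loop of A: state = (current_img_indx, media_data)
def fmtLoopA : List String → Int → PySem.Dict String String → Int × PySem.Dict String String
  | [], idx, d => (idx, d)
  | image :: rest, idx, d =>
    if idx ≤ 10 then
      fmtLoopA rest (idx + 1) (d.insert ("media" ++ PySem.Int.toStr idx) image)
    else
      fmtLoopA rest (idx + 1) (d.insert "mediax" (d.getD "mediax" "" ++ (image ++ "*")))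

def format_image_urls_as_sd_media (image_urls : List String) : List (String × String) :=
  let r := fmtLoopA image_urls 1 (PySem.Dict.ofList [("mediax", "")])
  let d :=
    if 10 < r.1 ∧ 0 < PySem.Str.len (r.2.getD "mediax" "") then
      r.2.insert "mediax" (PySem.Str.slice (r.2.getD "mediax" "") none (some (-1)))
    else r.2
  d.items

-- ===== PORT B =====
def format_image_urls_as_sd_media_alt (image_urls : List String) : List (String × String) :=
  let d0 := PySem.Dict.ofList [("mediax", PySem.Str.join "*" (PySem.List.slice image_urls (some 10) none))]
  let d := (PySem.List.enumerate (PySem.List.slice image_urls none (some 10))).foldl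
    (fun d p => d.insert ("media" ++ PySem.Int.toStr (p.1 + 1)) p.2) d0
  d.items

-- ===== PRECONDITION & SPEC =====
def Spec_format_image_urls_as_sd_media (image_urls : List String) (out : List (String × String)) : Prop := out = format_image_urls_as_sd_media_alt image_urls
instance (image_urls : List String) (out : List (String × String)) : Decidable (Spec_format_image_urls_as_sd_media image_urls out) := by unfold Spec_format_image_urls_as_sd_media; infer_instance

-- ===== CLAIM (what is proved, stated in full; the proofs are below) =====
def Claim_equal_format_image_urls_as_sd_media : Prop := ∀ (image_urls : List String), Dom_format_image_urls_as_sd_media image_urls → Spec_format_image_urls_as_sd_media image_urls (format_image_urls_as_sd_media image_urls)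

-- ===== LEMMAS AND PROOFS =====
theorem map_self_of_mem {α : Type} (f : α → α) (l : List α) (h : ∀ x ∈ l, f x = x) : l.map f = l := by
  induction l with
  | nil => rfl
  | cons a l ih =>
      simp only [List.map_cons, h a (by simp)]
      simp [ih fun x hx => h x (by simp [hx])]

-- the string A accumulates in mediax for the tail
def catStar : List String → String
  | [] => ""
  | x :: r => (x ++ "*") ++ catStar r

theorem toList_catStar_cons (y : String) (r : List String) :
    (catStar (y :: r)).toList =
      (PySem.Str.join "*" (y :: r)).toList ++ ['*'] := by
  induction r generalizing y with
  | nil =>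
      simp [catStar, PySem.Str.toList_join, PySem.Chars.join_singleton]
  | cons z r ih =>
      have h := ih z
      simp only [catStar, String.toList_append] at h ⊢
      rw [h]
      simp [PySem.Str.toList_join, PySem.Chars.join_cons_cons]

theorem slice_neg_one (l : List Char) : PySem.List.slice l none (some (-1)) = l.dropLast := by
  simp [PySem.List.slice, PySem.List.clampIdx]
  rcases l with _ | ⟨c, l⟩
  · simp
  · have h : ((↑(c :: l).length + (-1 : Int))).toNat = (c :: l).length - 1 := by
      simp
    simp [List.dropLast_eq_take]

-- phase 2 of A's loop: idx > 10, so every step appends to mediax (sitting at the head)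
theorem fmtLoopA_phase2 (l : List String) : ∀ (idx : Int) (v : String) (ps : List (String × String)),
    10 < idx → (∀ p ∈ ps, p.1 ≠ "mediax") →
    fmtLoopA l idx ⟨("mediax", v) :: ps⟩ =
      (idx + l.length, ⟨("mediax", v ++ catStar l) :: ps⟩) := by
  induction l with
  | nil => intro idx v ps h hps; simp [fmtLoopA, catStar]
  | cons x r ih =>
      intro idx v ps h hps
      have hle : ¬ idx ≤ 10 := by omega
      have hins : (PySem.Dict.mk (κ := String) (ν := String) (("mediax", v) :: ps)).insert "mediax"
          ((PySem.Dict.mk (("mediax", v) :: ps)).getD "mediax" "" ++ (x ++ "*")) =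
          ⟨("mediax", v ++ (x ++ "*")) :: ps⟩ := by
        simp [PySem.Dict.insert, PySem.Dict.contains, PySem.Dict.getD, PySem.Dict.get?]
        exact map_self_of_mem _ ps fun p hp => by simp [hps p hp]
      rw [show (fmtLoopA (x :: r) idx ⟨("mediax", v) :: ps⟩) =
          fmtLoopA r (idx + 1) ((PySem.Dict.mk (("mediax", v) :: ps)).insert "mediax"
            ((PySem.Dict.mk (("mediax", v) :: ps)).getD "mediax" "" ++ (x ++ "*"))) from by
        simp [fmtLoopA, hle]]
      rw [hins, ih (idx + 1) _ ps (by omega) hps]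
      simp [catStar, String.append_assoc]
      omega

theorem mk1 : "media" ++ PySem.Int.toStr 1 = "media1" := by decide
theorem mk2 : "media" ++ PySem.Int.toStr 2 = "media2" := by decide
theorem mk3 : "media" ++ PySem.Int.toStr 3 = "media3" := by decide
theorem mk4 : "media" ++ PySem.Int.toStr 4 = "media4" := by decide
theorem mk5 : "media" ++ PySem.Int.toStr 5 = "media5" := by decide
theorem mk6 : "media" ++ PySem.Int.toStr 6 = "media6" := by decide
theorem mk7 : "media" ++ PySem.Int.toStr 7 = "media7" := by decide
theorem mk8 : "media" ++ PySem.Int.toStr 8 = "media8" := by decide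
theorem mk9 : "media" ++ PySem.Int.toStr 9 = "media9" := by decide
theorem mk10 : "media" ++ PySem.Int.toStr 10 = "media10" := by decide
theorem jn : PySem.Str.join "*" ([] : List String) = "" := by decide

-- ===== VERDICT (by name: the statement is the Claim_ definition above) =====
theorem phase1 (a1 a2 a3 a4 a5 a6 a7 a8 a9 a10 : String) (l : List String) :
    fmtLoopA (a1::a2::a3::a4::a5::a6::a7::a8::a9::a10::l) 1 (PySem.Dict.ofList [("mediax", "")]) =
      fmtLoopA l 11 ⟨[("mediax", ""), ("media1", a1), ("media2", a2), ("media3", a3), ("media4", a4), ("media5", a5), ("media6", a6), ("media7", a7), ("media8", a8), ("media9", a9), ("media10", a10)]⟩ := by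
  simp [fmtLoopA, PySem.Dict.ofList, PySem.Dict.update, PySem.Dict.empty, PySem.Dict.insert,
    PySem.Dict.contains, mk1, mk2, mk3, mk4, mk5, mk6, mk7, mk8, mk9, mk10]

set_option maxHeartbeats 800000 in
theorem bigNil (a1 a2 a3 a4 a5 a6 a7 a8 a9 a10 : String) :
    format_image_urls_as_sd_media [a1, a2, a3, a4, a5, a6, a7, a8, a9, a10] =
      format_image_urls_as_sd_media_alt [a1, a2, a3, a4, a5, a6, a7, a8, a9, a10] := by
  unfold format_image_urls_as_sd_media format_image_urls_as_sd_media_alt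
  rw [show [a1, a2, a3, a4, a5, a6, a7, a8, a9, a10] = a1::a2::a3::a4::a5::a6::a7::a8::a9::a10::([] : List String) from rfl, phase1]
  simp [fmtLoopA, PySem.List.slice, PySem.List.clampIdx, PySem.List.enumerate,
    PySem.Dict.ofList, PySem.Dict.update, PySem.Dict.empty, PySem.Dict.insert,
    PySem.Dict.contains, PySem.Dict.getD, PySem.Dict.get?, PySem.Str.len_eq, jn,
    mk1, mk2, mk3, mk4, mk5, mk6, mk7, mk8, mk9, mk10]

set_option maxHeartbeats 800000 in
theorem bigCons (a1 a2 a3 a4 a5 a6 a7 a8 a9 a10 y : String) (r : List String) :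
    format_image_urls_as_sd_media (a1::a2::a3::a4::a5::a6::a7::a8::a9::a10::y::r) =
      format_image_urls_as_sd_media_alt (a1::a2::a3::a4::a5::a6::a7::a8::a9::a10::y::r) := by
  have hps : ∀ p ∈ [("media1", a1), ("media2", a2), ("media3", a3), ("media4", a4), ("media5", a5), ("media6", a6), ("media7", a7), ("media8", a8), ("media9", a9), ("media10", a10)], (p : String × String).1 ≠ "mediax" := by
    intro p hp
    simp only [List.mem_cons, List.not_mem_nil, or_false] at hp
    rcases hp with h|h|h|h|h|h|h|h|h|h <;> subst h <;> simp
  have h2 := fmtLoopA_phase2 (y::r) 11 "" [("media1", a1), ("media2", a2), ("media3", a3), ("media4", a4), ("media5", a5), ("media6", a6), ("media7", a7), ("media8", a8), ("media9", a9), ("media10", a10)] (by norm_num) hps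
  have hlen : 0 < (catStar (y::r)).length := by
    rw [← String.length_toList, toList_catStar_cons]
    simp
  have hstrip : PySem.Str.slice (catStar (y::r)) none (some (-1)) = PySem.Str.join "*" (y::r) := by
    apply String.toList_inj.mp
    rw [PySem.Str.toList_slice, PySem.Chars.slice_eq_listSlice, slice_neg_one, toList_catStar_cons]
    simp
  unfold format_image_urls_as_sd_media format_image_urls_as_sd_media_alt
  rw [phase1, h2]
  have hidx : (10 : Int) < 11 + ((r.length : Int) + 1) := by omega
  simp [hidx, hlen, hstrip, PySem.List.slice, PySem.List.clampIdx, PySem.List.enumerate,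
    PySem.Dict.ofList, PySem.Dict.update, PySem.Dict.empty, PySem.Dict.insert,
    PySem.Dict.contains, PySem.Dict.getD, PySem.Dict.get?, PySem.Str.len_eq,
    mk1, mk2, mk3, mk4, mk5, mk6, mk7, mk8, mk9, mk10]

set_option maxHeartbeats 1600000 in
theorem format_image_urls_as_sd_media_spec : Claim_equal_format_image_urls_as_sd_media := by
  intro l _
  unfold Spec_format_image_urls_as_sd_media
  rcases l with _ | ⟨a1, l⟩
  · decide
  rcases l with _ | ⟨a2, l⟩
  · simp [format_image_urls_as_sd_media, format_image_urls_as_sd_media_alt,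
      fmtLoopA, PySem.List.slice, PySem.List.clampIdx, PySem.List.enumerate,
      PySem.Dict.ofList, PySem.Dict.update, PySem.Dict.empty, PySem.Dict.insert,
      PySem.Dict.contains, PySem.Dict.getD, PySem.Dict.get?, PySem.Str.len_eq, jn,
      mk1, mk2, mk3, mk4, mk5, mk6, mk7, mk8, mk9, mk10]
  rcases l with _ | ⟨a3, l⟩
  · simp [format_image_urls_as_sd_media, format_image_urls_as_sd_media_alt,
      fmtLoopA, PySem.List.slice, PySem.List.clampIdx, PySem.List.enumerate,
      PySem.Dict.ofList, PySem.Dict.update, PySem.Dict.empty, PySem.Dict.insert,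
      PySem.Dict.contains, PySem.Dict.getD, PySem.Dict.get?, PySem.Str.len_eq, jn,
      mk1, mk2, mk3, mk4, mk5, mk6, mk7, mk8, mk9, mk10]
  rcases l with _ | ⟨a4, l⟩
  · simp [format_image_urls_as_sd_media, format_image_urls_as_sd_media_alt,
      fmtLoopA, PySem.List.slice, PySem.List.clampIdx, PySem.List.enumerate,
      PySem.Dict.ofList, PySem.Dict.update, PySem.Dict.empty, PySem.Dict.insert,
      PySem.Dict.contains, PySem.Dict.getD, PySem.Dict.get?, PySem.Str.len_eq, jn,
      mk1, mk2, mk3, mk4, mk5, mk6, mk7, mk8, mk9, mk10]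
  rcases l with _ | ⟨a5, l⟩
  · simp [format_image_urls_as_sd_media, format_image_urls_as_sd_media_alt,
      fmtLoopA, PySem.List.slice, PySem.List.clampIdx, PySem.List.enumerate,
      PySem.Dict.ofList, PySem.Dict.update, PySem.Dict.empty, PySem.Dict.insert,
      PySem.Dict.contains, PySem.Dict.getD, PySem.Dict.get?, PySem.Str.len_eq, jn,
      mk1, mk2, mk3, mk4, mk5, mk6, mk7, mk8, mk9, mk10]
  rcases l with _ | ⟨a6, l⟩
  · simp [format_image_urls_as_sd_media, format_image_urls_as_sd_media_alt,
      fmtLoopA, PySem.List.slice, PySem.List.clampIdx, PySem.List.enumerate,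
      PySem.Dict.ofList, PySem.Dict.update, PySem.Dict.empty, PySem.Dict.insert,
      PySem.Dict.contains, PySem.Dict.getD, PySem.Dict.get?, PySem.Str.len_eq, jn,
      mk1, mk2, mk3, mk4, mk5, mk6, mk7, mk8, mk9, mk10]
  rcases l with _ | ⟨a7, l⟩
  · simp [format_image_urls_as_sd_media, format_image_urls_as_sd_media_alt,
      fmtLoopA, PySem.List.slice, PySem.List.clampIdx, PySem.List.enumerate,
      PySem.Dict.ofList, PySem.Dict.update, PySem.Dict.empty, PySem.Dict.insert,
      PySem.Dict.contains, PySem.Dict.getD, PySem.Dict.get?, PySem.Str.len_eq, jn,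
      mk1, mk2, mk3, mk4, mk5, mk6, mk7, mk8, mk9, mk10]
  rcases l with _ | ⟨a8, l⟩
  · simp [format_image_urls_as_sd_media, format_image_urls_as_sd_media_alt,
      fmtLoopA, PySem.List.slice, PySem.List.clampIdx, PySem.List.enumerate,
      PySem.Dict.ofList, PySem.Dict.update, PySem.Dict.empty, PySem.Dict.insert,
      PySem.Dict.contains, PySem.Dict.getD, PySem.Dict.get?, PySem.Str.len_eq, jn,
      mk1, mk2, mk3, mk4, mk5, mk6, mk7, mk8, mk9, mk10]
  rcases l with _ | ⟨a9, l⟩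
  · simp [format_image_urls_as_sd_media, format_image_urls_as_sd_media_alt,
      fmtLoopA, PySem.List.slice, PySem.List.clampIdx, PySem.List.enumerate,
      PySem.Dict.ofList, PySem.Dict.update, PySem.Dict.empty, PySem.Dict.insert,
      PySem.Dict.contains, PySem.Dict.getD, PySem.Dict.get?, PySem.Str.len_eq, jn,
      mk1, mk2, mk3, mk4, mk5, mk6, mk7, mk8, mk9, mk10]
  rcases l with _ | ⟨a10, l⟩
  · simp [format_image_urls_as_sd_media, format_image_urls_as_sd_media_alt,
      fmtLoopA, PySem.List.slice, PySem.List.clampIdx, PySem.List.enumerate,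
      PySem.Dict.ofList, PySem.Dict.update, PySem.Dict.empty, PySem.Dict.insert,
      PySem.Dict.contains, PySem.Dict.getD, PySem.Dict.get?, PySem.Str.len_eq, jn,
      mk1, mk2, mk3, mk4, mk5, mk6, mk7, mk8, mk9, mk10]
  rcases l with _ | ⟨y, r⟩
  · exact bigNil a1 a2 a3 a4 a5 a6 a7 a8 a9 a10
  · exact bigCons a1 a2 a3 a4 a5 a6 a7 a8 a9 a10 y r
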